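-- pv_equiv track=rewrite | github.com/nogibjj/NLP_MarkovModel_LSTM | Markov Text Generator.py | buildCount
-- ===== SOURCE A (Python) =====
-- def buildCount(sentence, n, corpus):
--     count = {}
--     # Count the frequency of each word if n is 1
--     if n == 1:
--         for eachWord in corpus:
--             if eachWord not in count:
--                 count[eachWord] = 1
--                 pass
--             else:
--                 count[eachWord] += 1
--                 pass
--             pass
--         pass
--     else:
--         # Loop over the entire corpus
--         for eachToken in range(n - 1, len(corpus)):
--             # find the n-grams that match the sentence
--             if corpus[eachToken - n + 1 : eachToken] == sentence[-n + 1 :]: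
--                 # Count the number of times each n-gram occurs
--                 if corpus[eachToken] not in count:
--                     count[corpus[eachToken]] = 1
--                     pass
--                 else:
--                     count[corpus[eachToken]] += 1
--                     pass
--                 pass
--             pass
--         pass
--     return count
-- ===== SOURCE B (Python) =====
-- def buildCount(sentence, n, corpus):
--     count = {}
--     if n == 1:
--         for w in corpus:
--             count[w] = count.get(w, 0) + 1
--         return count
--     k = n - 1
--     pat = sentence[-k:]
--     if len(pat) != k:
--         # context shorter than the (n-1)-gram: no window can ever match
--         return count
--     first = pat[0]
--     L = len(corpus)
--     start = 0
--     while True: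
--         try:
--             p = corpus.index(first, start)  # jump to the next anchor (first pattern token)
--         except ValueError:
--             break
--         start = p + 1
--         if p + k < L and corpus[p:p + k] == pat:
--             w = corpus[p + k]
--             count[w] = count.get(w, 0) + 1
--     return count
-- ===== Notes on version B (the rewrite author's own statement) =====
-- stated objective: alternative
-- what changed: Instead of slicing and comparing a full (n-1)-token window at every corpus position, B extracts the pattern once and anchor-scans: it jumps between occurrences of the pattern's first token with list.index and verifies one window per anchor, tallying the following token; the n==1 branch counts with dict.get instead of a membership test.
-- outside the precondition, e.g. on buildCount(['c', 'c', 'a'], -2, ['c', 'd', 'a', 'c']): A returns {'c': 2, 'd': 1, 'a': 1}, B returns {}; on buildCount(['a'], -5, ['x', 'y']): A raises IndexError, B returns {}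
import Mathlib
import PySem

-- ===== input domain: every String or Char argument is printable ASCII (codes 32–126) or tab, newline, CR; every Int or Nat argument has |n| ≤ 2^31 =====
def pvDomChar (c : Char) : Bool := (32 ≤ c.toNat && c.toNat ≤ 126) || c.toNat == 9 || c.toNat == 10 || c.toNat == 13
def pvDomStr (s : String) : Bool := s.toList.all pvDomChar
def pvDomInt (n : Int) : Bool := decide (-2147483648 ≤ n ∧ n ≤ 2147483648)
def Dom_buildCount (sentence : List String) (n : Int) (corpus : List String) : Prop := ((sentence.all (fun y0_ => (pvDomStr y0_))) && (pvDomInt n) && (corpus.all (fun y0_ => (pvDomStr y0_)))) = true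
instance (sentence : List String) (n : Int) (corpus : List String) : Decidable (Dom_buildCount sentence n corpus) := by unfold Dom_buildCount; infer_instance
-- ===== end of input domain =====

-- B replaces A's scan that slices and compares an (n-1)-window at every position by an
-- anchor scan: jump between occurrences of the pattern's first token (list.index) and
-- verify one window per anchor; same results, different traversal.

-- ===== PORT A =====
def buildCount (sentence : List String) (n : Int) (corpus : List String) : List (String × Int) :=
  let count : PySem.Dict String Int := PySem.Dict.empty
  let count :=
    if n == 1 then
      corpus.foldl (fun count eachWord =>
        if !count.contains eachWord then count.insert eachWord 1
        else count.insert eachWord (count.getD eachWord 0 + 1)   -- count[w] += 1; getD is exact: the key is present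
        ) count
    else
      (PySem.List.pyRange (n - 1) (PySem.List.len corpus)).foldl (fun count eachToken =>
        if PySem.List.slice corpus (some (eachToken - n + 1)) (some eachToken)
             == PySem.List.slice sentence (some (-n + 1)) none then
          let w := PySem.List.pyGetD corpus eachToken ""   -- corpus[eachToken]: in range under Pre_ (n ≥ 1)
          if !count.contains w then count.insert w 1
          else count.insert w (count.getD w 0 + 1)         -- count[corpus[eachToken]] += 1; getD exact: key present
        else count) count
  count.items

-- ===== PORT B =====
-- B's while loop: 'p = corpus.index(first, start)' jumps to the next anchor; ValueError breaks;
-- the matched window tallies corpus[p+k] (Python binds it to w; it is inlined here).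
def buildCountScan (corpus pat : List String) (first : String) (kN : Nat)
    (count : PySem.Dict String Int) (start : Nat) : PySem.Dict String Int :=
  match h : List.idxOf? first (corpus.drop start) with
  | none => count                                          -- ValueError: no further anchor
  | some off =>
      buildCountScan corpus pat first kN
        (if decide (start + off + kN < corpus.length)
            && (PySem.List.slice corpus (some ((start + off : Nat) : Int))
                  (some ((start + off + kN : Nat) : Int)) == pat)
         then count.insert (corpus.getD (start + off + kN) "")
                (count.getD (corpus.getD (start + off + kN) "") 0 + 1)
         else count)                                       -- indexing in range by the guard
        (start + off + 1)
termination_by corpus.length - start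
decreasing_by
  rcases List.idxOf?_eq_some_iff.mp h with ⟨hlt, -⟩
  simp only [List.length_drop] at hlt
  omega

def buildCount_alt (sentence : List String) (n : Int) (corpus : List String) : List (String × Int) :=
  if n == 1 then
    (corpus.foldl (fun count w => count.insert w (count.getD w 0 + 1)) PySem.Dict.empty).items
  else
    let k := n - 1
    let pat := PySem.List.slice sentence (some (-k)) none
    if PySem.List.len pat != k then (PySem.Dict.empty : PySem.Dict String Int).items
    else
      let first := PySem.List.pyGetD pat 0 ""              -- pat[0]: pat is nonempty (len pat = k ≥ 1)
      (buildCountScan corpus pat first k.toNat PySem.Dict.empty 0).items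

-- ===== PRECONDITION & SPEC =====
-- Pre_ excludes n ≤ 0, where the n-gram order is meaningless and A's behaviour is an accident of its
-- negative range/indexing: it raises IndexError or counts tokens reached by negative-index wraparound.
def Pre_buildCount (sentence : List String) (n : Int) (corpus : List String) : Prop := 1 ≤ n
instance (sentence : List String) (n : Int) (corpus : List String) : Decidable (Pre_buildCount sentence n corpus) := by unfold Pre_buildCount; infer_instance
def pvWitness_buildCount : List String × Int × List String := (["a"], 2, ["a", "b", "a", "c", "a", "b"])

def Spec_buildCount (sentence : List String) (n : Int) (corpus : List String) (out : List (String × Int)) : Prop := out = buildCount_alt sentence n corpus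
instance (sentence : List String) (n : Int) (corpus : List String) (out : List (String × Int)) : Decidable (Spec_buildCount sentence n corpus out) := by unfold Spec_buildCount; infer_instance

-- ===== CLAIM (what is proved, stated in full; the proofs are below) =====
def Claim_equal_buildCount : Prop := ∀ (sentence : List String) (n : Int) (corpus : List String), Dom_buildCount sentence n corpus → Pre_buildCount sentence n corpus → Spec_buildCount sentence n corpus (buildCount sentence n corpus)

-- ===== LEMMAS AND PROOFS =====

-- A's membership-guarded counter step equals B's get-default counter step.
lemma step_eq (d : PySem.Dict String Int) (w : String) :
    (if !d.contains w then d.insert w 1 else d.insert w (d.getD w 0 + 1))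
      = d.insert w (d.getD w 0 + 1) := by
  by_cases h : d.contains w = true
  · simp [h]
  · simp only [Bool.not_eq_true] at h
    rw [PySem.Dict.getD_of_not_contains _ _ h]
    simp

-- The anchor-scan loop tallies exactly the anchor positions whose window matches, in order.
lemma scan_eq (c pat : List String) (first : String) (kN : Nat) (start : Nat)
    (d : PySem.Dict String Int) :
    buildCountScan c pat first kN d start
      = ((List.range' start (c.length - start)).filter
          (fun p => (getElem? c p == some first)
              && (decide (p + kN < c.length)
                  && (PySem.List.slice c (some ((p : Nat) : Int)) (some ((p + kN : Nat) : Int)) == pat)))).foldl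
          (fun d p => d.insert (c.getD (p + kN) "") (d.getD (c.getD (p + kN) "") 0 + 1)) d := by
  fun_induction buildCountScan c pat first kN d start with
  | case1 count start h =>
      have hnil : (List.range' start (c.length - start)).filter
          (fun p => (getElem? c p == some first)
              && (decide (p + kN < c.length)
                  && (PySem.List.slice c (some ((p : Nat) : Int)) (some ((p + kN : Nat) : Int)) == pat))) = [] := by
        apply List.filter_eq_nil_iff.mpr
        intro q hq
        rw [List.mem_range'] at hq
        obtain ⟨i, hi, rfl⟩ := hq
        have hanch : (getElem? c (start + i) == some first) = false := by
          rw [beq_eq_false_iff_ne]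
          intro hsome
          rw [← List.getElem?_drop] at hsome
          rw [List.idxOf?_eq_none_iff] at h
          exact h (List.mem_of_getElem? hsome)
        simp [hanch]
      rw [hnil]
      rfl
  | case2 count start off h ih =>
      rcases List.idxOf?_eq_some_iff.mp h with ⟨hlt0, hhit, hmin⟩
      have hlt : off < c.length - start := by
        have := hlt0
        simp only [List.length_drop] at this
        omega
      have hp : start + off < c.length := by omega
      have hsplit : List.range' start (c.length - start)
          = List.range' start off ++ List.range' (start + off) (c.length - start - off) := by
        rw [show c.length - start = off + (c.length - start - off) from by omega,
          ← List.range'_append (step := 1)]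
        simp
      have hnil : (List.range' start off).filter
          (fun p => (getElem? c p == some first)
              && (decide (p + kN < c.length)
                  && (PySem.List.slice c (some ((p : Nat) : Int)) (some ((p + kN : Nat) : Int)) == pat))) = [] := by
        apply List.filter_eq_nil_iff.mpr
        intro q hq
        rw [List.mem_range'] at hq
        obtain ⟨i, hi, rfl⟩ := hq
        have hanch : (getElem? c (start + i) == some first) = false := by
          rw [beq_eq_false_iff_ne]
          intro hsome
          rw [← List.getElem?_drop] at hsome
          obtain ⟨hl, he⟩ := List.getElem?_eq_some_iff.mp hsome
          exact hmin i (by omega) he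
        simp [hanch]
      have hpos : List.range' (start + off) (c.length - start - off)
          = (start + off) :: List.range' (start + off + 1) (c.length - start - off - 1) := by
        conv_lhs => rw [show c.length - start - off = (c.length - start - off - 1) + 1 from by omega]
        rw [List.range'_succ]
      have hanchor : (getElem? c (start + off) == some first) = true := by
        have h1 : getElem? (c.drop start) off = some first := by
          rw [List.getElem?_eq_getElem hlt0, hhit]
        rw [← List.getElem?_drop, h1]
        simp
      have harg : c.length - start - off - 1 = c.length - (start + off + 1) := by omega
      rw [hsplit, List.filter_append, hnil, List.nil_append, hpos, List.filter_cons]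
      cases hX : (decide (start + off + kN < c.length)
          && (PySem.List.slice c (some ((start + off : Nat) : Int))
                (some ((start + off + kN : Nat) : Int)) == pat)) with
      | true =>
          simp only [hX, hanchor, Bool.and_true, reduceIte, reduceDIte] at ih ⊢
          rw [List.foldl_cons, harg]
          exact ih
      | false =>
          simp only [hX, hanchor, Bool.and_false] at ih ⊢
          rw [harg]
          exact ih

-- A matching window must start with the anchor token, so the anchor test is redundant.
lemma anchor_redundant (c pat : List String) (first : String) (kN : Nat)
    (hk : 0 < kN) (hfirst : getElem? pat 0 = some first) (l : List Nat) :
    l.filter (fun p => (getElem? c p == some first)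
        && (decide (p + kN < c.length)
            && (PySem.List.slice c (some ((p : Nat) : Int)) (some ((p + kN : Nat) : Int)) == pat)))
      = l.filter (fun p => decide (p + kN < c.length)
            && (PySem.List.slice c (some ((p : Nat) : Int)) (some ((p + kN : Nat) : Int)) == pat)) := by
  apply List.filter_congr
  intro p _
  by_cases hX : (decide (p + kN < c.length)
      && (PySem.List.slice c (some ((p : Nat) : Int)) (some ((p + kN : Nat) : Int)) == pat)) = true
  · rw [hX]
    have hX' := hX
    rw [Bool.and_eq_true] at hX'
    obtain ⟨h1, h2⟩ := hX'
    have hpk : p + kN < c.length := of_decide_eq_true h1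
    have hsl : PySem.List.slice c (some ((p : Nat) : Int)) (some ((p + kN : Nat) : Int))
        = (c.drop p).take kN := by
      rw [PySem.List.slice_natCast]
      congr 1
      omega
    have heq : (c.drop p).take kN = pat := by rw [← hsl]; exact eq_of_beq h2
    have h0 : getElem? c p = some first := by
      have := congrArg (fun l => getElem? l 0) heq
      simpa [List.getElem?_take, List.getElem?_drop, hk, hfirst] using this
    simp [h0]
  · rw [Bool.not_eq_true] at hX
    rw [hX]
    simp

-- A foldl over the image positions equals the foldl over the source positions.
lemma transport_gen (l : List Nat) (f : Nat → Int) (pI : Int → Bool) (pN : Nat → Bool)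
    (sI : PySem.Dict String Int → Int → PySem.Dict String Int)
    (sN : PySem.Dict String Int → Nat → PySem.Dict String Int)
    (hp : ∀ x ∈ l, pI (f x) = pN x)
    (hs : ∀ (d : PySem.Dict String Int), ∀ x ∈ l, sI d (f x) = sN d x) :
    ∀ d : PySem.Dict String Int,
      ((l.map f).filter pI).foldl sI d = (l.filter pN).foldl sN d := by
  induction l with
  | nil => intro d; rfl
  | cons a t ih =>
      intro d
      simp only [List.map_cons, List.filter_cons]
      rw [hp a (by simp)]
      by_cases hpa : pN a = true
      · rw [if_pos hpa, if_pos hpa, List.foldl_cons, List.foldl_cons, hs d a (by simp)]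
        exact ih (fun x hx => hp x (List.mem_cons_of_mem _ hx))
          (fun d x hx => hs d x (List.mem_cons_of_mem _ hx)) _
      · rw [if_neg hpa, if_neg hpa]
        exact ih (fun x hx => hp x (List.mem_cons_of_mem _ hx))
          (fun d x hx => hs d x (List.mem_cons_of_mem _ hx)) _

-- A's end-position fold over the matching windows equals B's start-position fold.
lemma fold_transport (c pat : List String) (n : Int) (hn : 2 ≤ n) (d : PySem.Dict String Int) :
    ((PySem.List.pyRange (n - 1) (PySem.List.len c)).filter
        (fun i => PySem.List.slice c (some (i - n + 1)) (some i) == pat)).foldl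
      (fun acc i => acc.insert (PySem.List.pyGetD c i "")
        (acc.getD (PySem.List.pyGetD c i "") 0 + 1)) d
    = ((List.range' 0 c.length).filter
        (fun p => decide (p + (n - 1).toNat < c.length)
            && (PySem.List.slice c (some ((p : Nat) : Int))
                  (some ((p + (n - 1).toNat : Nat) : Int)) == pat))).foldl
      (fun d p => d.insert (c.getD (p + (n - 1).toNat) "")
        (d.getD (c.getD (p + (n - 1).toNat) "") 0 + 1)) d := by
  have hp : ∀ x ∈ List.range (c.length - (n - 1).toNat),
      (fun i => PySem.List.slice c (some (i - n + 1)) (some i) == pat) ((n - 1) + (x : Int))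
        = (fun p => decide (p + (n - 1).toNat < c.length)
            && (PySem.List.slice c (some ((p : Nat) : Int))
                  (some ((p + (n - 1).toNat : Nat) : Int)) == pat)) x := by
    intro x hx
    rw [List.mem_range] at hx
    have h1 : x + (n - 1).toNat < c.length := by omega
    simp only
    rw [show (n - 1) + (x : Int) - n + 1 = ((x : Nat) : Int) from by omega,
      show (n - 1) + (x : Int) = ((x + (n - 1).toNat : Nat) : Int) from by omega,
      show decide (x + (n - 1).toNat < c.length) = true from by
        rw [decide_eq_true_eq]; exact h1,
      Bool.true_and]
  have hs : ∀ (d : PySem.Dict String Int), ∀ x ∈ List.range (c.length - (n - 1).toNat),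
      (fun acc i => acc.insert (PySem.List.pyGetD c i "")
        (acc.getD (PySem.List.pyGetD c i "") 0 + 1)) d ((n - 1) + (x : Int))
        = (fun d p => d.insert (c.getD (p + (n - 1).toNat) "")
            (d.getD (c.getD (p + (n - 1).toNat) "") 0 + 1)) d x := by
    intro d x _
    simp only
    rw [show (n - 1) + (x : Int) = ((x + (n - 1).toNat : Nat) : Int) from by omega,
      PySem.List.pyGetD_natCast]
  rw [PySem.List.pyRange_one, PySem.List.len_eq,
    show (((c.length : Nat) : Int) - (n - 1)).toNat = c.length - (n - 1).toNat from by omega]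
  rw [transport_gen (List.range (c.length - (n - 1).toNat)) (fun k => (n - 1) + (k : Int))
      (fun i => PySem.List.slice c (some (i - n + 1)) (some i) == pat)
      (fun p => decide (p + (n - 1).toNat < c.length)
          && (PySem.List.slice c (some ((p : Nat) : Int))
                (some ((p + (n - 1).toNat : Nat) : Int)) == pat))
      (fun acc i => acc.insert (PySem.List.pyGetD c i "")
        (acc.getD (PySem.List.pyGetD c i "") 0 + 1))
      (fun d p => d.insert (c.getD (p + (n - 1).toNat) "")
        (d.getD (c.getD (p + (n - 1).toNat) "") 0 + 1)) hp hs d]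
  rw [← List.range_eq_range']
  by_cases hKL : (n - 1).toNat ≤ c.length
  · have hsplitR : List.range c.length
        = List.range (c.length - (n - 1).toNat)
          ++ List.map (fun x => (c.length - (n - 1).toNat) + x) (List.range (n - 1).toNat) := by
      conv_lhs => rw [show c.length = (c.length - (n - 1).toNat) + (n - 1).toNat from by omega]
      exact List.range_add
    have hnil : (List.map (fun x => (c.length - (n - 1).toNat) + x) (List.range (n - 1).toNat)).filter
        (fun p => decide (p + (n - 1).toNat < c.length)
            && (PySem.List.slice c (some ((p : Nat) : Int))
                  (some ((p + (n - 1).toNat : Nat) : Int)) == pat)) = [] := by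
      apply List.filter_eq_nil_iff.mpr
      intro q hq
      rw [List.mem_map] at hq
      obtain ⟨x, hx, rfl⟩ := hq
      simp only [Bool.and_eq_true, decide_eq_true_eq]
      rintro ⟨h1, -⟩
      omega
    rw [hsplitR, List.filter_append, hnil, List.append_nil]
  · have h0 : c.length - (n - 1).toNat = 0 := by omega
    have hnil2 : (List.range c.length).filter
        (fun p => decide (p + (n - 1).toNat < c.length)
            && (PySem.List.slice c (some ((p : Nat) : Int))
                  (some ((p + (n - 1).toNat : Nat) : Int)) == pat)) = [] := by
      apply List.filter_eq_nil_iff.mpr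
      intro q _
      simp only [Bool.and_eq_true, decide_eq_true_eq]
      rintro ⟨h1, -⟩
      omega
    rw [h0, hnil2]
    simp

-- ===== VERDICT (by name: the statement is the Claim_ definition above) =====
theorem buildCount_spec : Claim_equal_buildCount := by
  intro s n c _dom hpre
  unfold Spec_buildCount
  by_cases hn1 : n = 1
  · subst hn1
    simp only [buildCount, buildCount_alt, BEq.rfl, if_true]
    rw [PySem.List.foldl_congr_mem _ _ _ _ (fun acc w _ => step_eq acc w)]
  · have hn2 : 2 ≤ n := by
      unfold Pre_buildCount at hpre; omega
    have hbeq : (n == 1) = false := by simp [hn1]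
    simp only [buildCount, buildCount_alt, hbeq, Bool.false_eq_true, if_false]
    rw [show -n + 1 = -(n - 1) from by ring]
    have hpat : PySem.List.slice s (some (-(n - 1))) = s.drop (s.length - (n - 1).toNat) := by
      rw [show -(n - 1) = -(((n - 1).toNat : Nat) : Int) from by omega,
        PySem.List.slice_some_none, PySem.List.clampIdx_neg_natCast _ _ (by omega)]
    by_cases hs : (n - 1).toNat ≤ s.length
    · -- the pattern really has n-1 tokens: both sides tally the matching windows
      have hg : (PySem.List.len (PySem.List.slice s (some (-(n - 1)))) != n - 1) = false := by
        rw [hpat, bne_eq_false_iff_eq]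
        simp only [PySem.List.len_eq, List.length_drop]
        omega
      rw [hg]
      simp only [Bool.false_eq_true, if_false]
      rw [PySem.List.foldl_if_eq_foldl_filter
        (fun i => PySem.List.slice c (some (i - n + 1)) (some i) == PySem.List.slice s (some (-(n - 1))))
        (fun (acc : PySem.Dict String Int) i =>
          if !acc.contains (PySem.List.pyGetD c i "") then acc.insert (PySem.List.pyGetD c i "") 1
          else acc.insert (PySem.List.pyGetD c i "") (acc.getD (PySem.List.pyGetD c i "") 0 + 1))]
      rw [PySem.List.foldl_congr_mem _ _
        (fun (acc : PySem.Dict String Int) i =>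
          acc.insert (PySem.List.pyGetD c i "") (acc.getD (PySem.List.pyGetD c i "") 0 + 1)) _
        (fun acc x _ => step_eq acc _)]
      rw [fold_transport c (PySem.List.slice s (some (-(n - 1)))) n hn2 PySem.Dict.empty]
      have hlenpat : (PySem.List.slice s (some (-(n - 1)))).length = (n - 1).toNat := by
        rw [hpat, List.length_drop]
        omega
      have hfirst : getElem? (PySem.List.slice s (some (-(n - 1)))) 0 =
          some (PySem.List.pyGetD (PySem.List.slice s (some (-(n - 1)))) 0 "") := by
        have h0 : 0 < (PySem.List.slice s (some (-(n - 1)))).length := by omega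
        rw [PySem.List.pyGetD_zero, List.getElem?_eq_getElem h0, List.getD_eq_getElem _ _ h0]
      rw [scan_eq, Nat.sub_zero,
        anchor_redundant c _ _ _ (by omega) hfirst]
    · -- the sentence is shorter than n-1: no window can match; both return the empty dict
      have hg : (PySem.List.len (PySem.List.slice s (some (-(n - 1)))) != n - 1) = true := by
        rw [hpat, bne_iff_ne]
        simp only [PySem.List.len_eq, List.length_drop]
        omega
      rw [hg]
      simp only [if_true]
      rw [PySem.List.foldl_congr_mem _ _ (fun acc _ => acc) _ ?_, PySem.List.foldl_ignore]
      intro acc x hx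
      rw [PySem.List.mem_pyRange_one] at hx
      simp only [PySem.List.len_eq] at hx
      have hcond : (PySem.List.slice c (some (x - n + 1)) (some x)
          == PySem.List.slice s (some (-(n - 1)))) = false := by
        rw [beq_eq_false_iff_ne]
        intro heq
        have hlen := congrArg List.length heq
        rw [PySem.List.slice_of_nonneg c (by omega) (by omega) (by omega) (by omega), hpat] at hlen
        simp only [List.length_take, List.length_drop] at hlen
        omega
      rw [hcond]
      simp
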